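-- pv_equiv track=rewrite | github.com/NMJlam/Coding-Problems | Codeforces/TheNormalProblem.py | convert
-- ===== SOURCE A (Python) =====
-- def convert(a: str) -> str:
--
--     b = ""
--
--     for idx in range(len(a)-1, -1, -1):
--         letter = a[idx]
--
--         if letter == "p":
--             b += "q"
--         elif letter == "q":
--             b += "p"
--         else:
--             b += letter
--
--     return b
-- ===== SOURCE B (Python) =====
-- def convert(a: str) -> str:
--     return a[::-1].translate(str.maketrans({'p': 'q', 'q': 'p'}))
-- ===== Notes on version B (the rewrite author's own statement) =====
-- stated objective: idiomatic
-- what changed: Replaces the explicit descending index loop with an if/elif chain and repeated string concatenation by slice reversal plus a translation table applied in one vectorized pass.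
import Mathlib
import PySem

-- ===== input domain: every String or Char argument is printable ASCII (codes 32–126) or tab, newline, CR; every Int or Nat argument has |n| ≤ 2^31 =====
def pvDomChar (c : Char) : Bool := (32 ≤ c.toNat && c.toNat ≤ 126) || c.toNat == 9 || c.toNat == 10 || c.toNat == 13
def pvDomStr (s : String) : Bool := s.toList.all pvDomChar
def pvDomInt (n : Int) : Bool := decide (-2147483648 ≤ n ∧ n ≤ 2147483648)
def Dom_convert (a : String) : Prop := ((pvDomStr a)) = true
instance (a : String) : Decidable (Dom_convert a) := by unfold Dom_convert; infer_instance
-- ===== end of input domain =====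

-- B replaces A's descending index loop with an if/elif chain by slice reversal plus a
-- translation-table map in one pass; equal return values (no side effects involved).

-- ===== PORT A =====
-- 'for idx in range(len(a)-1, -1, -1)' as the obvious descending structural recursion:
-- convertLoop a k b processes indices k-1, k-2, …, 0, appending to the accumulator b.
def convertLoop (a : List Char) : Nat → List Char → List Char
  | 0, b => b
  | k+1, b =>
      let letter := (a[k]?).getD ' '   -- a[idx]; index is always in range in A's loop
      if letter = 'p' then convertLoop a k (b ++ ['q'])
      else if letter = 'q' then convertLoop a k (b ++ ['p'])
      else convertLoop a k (b ++ [letter])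

def convert (a : String) : String :=
  String.ofList (convertLoop a.toList a.toList.length [])

-- ===== PORT B =====
-- the translation table str.maketrans({'p':'q','q':'p'}) as a per-character lookup
def swapTable (c : Char) : Char :=
  if c = 'p' then 'q' else if c = 'q' then 'p' else c

-- a[::-1].translate(table): reverse, then map the table over the result
def convert_alt (a : String) : String :=
  String.ofList ((a.toList.reverse).map swapTable)

-- ===== PRECONDITION & SPEC =====
def Spec_convert (a : String) (out : String) : Prop := out = convert_alt a
instance (a : String) (out : String) : Decidable (Spec_convert a out) := by unfold Spec_convert; infer_instance

-- ===== CLAIM (what is proved, stated in full; the proofs are below) =====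
def Claim_equal_convert : Prop := ∀ (a : String), Dom_convert a → Spec_convert a (convert a)

-- ===== LEMMAS AND PROOFS =====

lemma convertLoop_eq (a : List Char) :
    ∀ (k : Nat), k ≤ a.length → ∀ (b : List Char),
      convertLoop a k b = b ++ ((a.take k).reverse.map swapTable) := by
  intro k
  induction k with
  | zero => intro _ b; simp [convertLoop]
  | succ n ih =>
      intro hk b
      have hn : n < a.length := Nat.lt_of_succ_le hk
      have hget : a[n]? = some a[n] := List.getElem?_eq_getElem hn
      have htake : (a.take (n+1)).reverse = a[n] :: (a.take n).reverse := by
        rw [List.take_add_one, hget]; simp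
      have ihn := ih (Nat.le_of_lt hn)
      simp only [convertLoop, hget, Option.getD_some, htake, List.map_cons]
      by_cases hp : a[n] = 'p'
      · simp [hp, ihn, swapTable]
      · by_cases hq : a[n] = 'q'
        · simp [hq, ihn, swapTable]
        · simp [hp, hq, ihn, swapTable]

-- ===== VERDICT (by name: the statement is the Claim_ definition above) =====
theorem convert_spec : Claim_equal_convert := by
  intro a _
  unfold Spec_convert convert convert_alt
  rw [convertLoop_eq a.toList a.toList.length (Nat.le_refl _) []]
  simp only [List.nil_append, List.take_length]
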